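-- pv_equiv track=rewrite | github.com/daniel-reich/turbo-robot | LDQvCxTPv4iiY8B2A_6.py | same_upsidedown
-- ===== SOURCE A (Python) =====
-- def same_upsidedown(ntxt):
--   a=''
--   for e in str(ntxt):
--     if e=='9':
--       a='6'+a
--     elif e=='6':
--       a='9'+a
--     else:
--       a=e+a
--   return a==str(ntxt)
-- ===== SOURCE B (Python) =====
-- def same_upsidedown(ntxt):
--     s = str(ntxt)
--     i, j = 0, len(s) - 1
--     while i <= j:
--         if _flip(s[i]) != s[j]:
--             return False
--         i, j = i + 1, j - 1
--     return True
--
-- def _flip(c):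
--     if c == '6':
--         return '9'
--     if c == '9':
--         return '6'
--     return c
-- ===== Notes on version B (the rewrite author's own statement) =====
-- stated objective: alternative
-- what changed: B replaces A's construction of a flipped-and-reversed copy of the whole string (plus a final full string comparison) by a two-pointer scan comparing flip(s[i]) with s[j] from both ends inward, returning False at the first mismatch and allocating nothing.
import Mathlib
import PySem

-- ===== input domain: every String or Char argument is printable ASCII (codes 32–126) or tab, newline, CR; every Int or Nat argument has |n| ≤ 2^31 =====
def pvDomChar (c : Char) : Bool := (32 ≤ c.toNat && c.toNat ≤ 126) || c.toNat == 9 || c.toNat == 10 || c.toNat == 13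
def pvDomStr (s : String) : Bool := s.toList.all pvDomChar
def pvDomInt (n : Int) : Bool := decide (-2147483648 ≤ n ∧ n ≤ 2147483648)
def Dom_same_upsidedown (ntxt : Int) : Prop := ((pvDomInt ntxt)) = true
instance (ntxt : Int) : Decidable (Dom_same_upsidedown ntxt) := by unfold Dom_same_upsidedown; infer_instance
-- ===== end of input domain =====

-- B replaces A's flipped-and-reversed full copy of the string by a two-pointer scan
-- from both ends inward with early exit; same O(n) cost, no new string built.

-- ===== PORT A =====
-- str(ntxt) handled as its list of characters; prepending a char = cons.
def same_upsidedown (ntxt : Int) : Bool :=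
  let s := (PySem.Int.toStr ntxt).toList
  let a := s.foldl (fun a e => if e = '9' then '6' :: a else if e = '6' then '9' :: a else e :: a) ([] : List Char)
  a == s

-- ===== PORT B =====
-- port of Source B's helper _flip
def pyFlip (c : Char) : Char := if c = '6' then '9' else if c = '9' then '6' else c

-- port of Source B's while loop (i, j two pointers); s[i]/s[j] are always in range in Source B,
-- getD's default is never used on reachable inputs
def altGo (s : List Char) (i j : Nat) : Bool :=
  if _h : i ≤ j then
    if pyFlip (s.getD i ' ') == s.getD j ' ' then altGo s (i + 1) (j - 1) else false
  else true
termination_by j + 1 - i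
decreasing_by omega

def same_upsidedown_alt (ntxt : Int) : Bool :=
  let s := (PySem.Int.toStr ntxt).toList
  altGo s 0 (s.length - 1)

-- ===== PRECONDITION & SPEC =====
def Spec_same_upsidedown (ntxt : Int) (out : Bool) : Prop := out = same_upsidedown_alt ntxt
instance (ntxt : Int) (out : Bool) : Decidable (Spec_same_upsidedown ntxt out) := by unfold Spec_same_upsidedown; infer_instance

-- ===== CLAIM (what is proved, stated in full; the proofs are below) =====
def Claim_equal_same_upsidedown : Prop := ∀ (ntxt : Int), Dom_same_upsidedown ntxt → Spec_same_upsidedown ntxt (same_upsidedown ntxt)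

-- ===== LEMMAS AND PROOFS =====

lemma pyFlip_invol (c : Char) : pyFlip (pyFlip c) = c := by
  by_cases h6 : c = '6' <;> by_cases h9 : c = '9' <;> simp [pyFlip, h6, h9]

lemma flipA_eq (e : Char) (acc : List Char) :
    (if e = '9' then '6' :: acc else if e = '6' then '9' :: acc else e :: acc) = pyFlip e :: acc := by
  by_cases h6 : e = '6' <;> by_cases h9 : e = '9' <;> simp [pyFlip, h6, h9]

lemma foldl_flip (s : List Char) (acc : List Char) :
    s.foldl (fun a e => if e = '9' then '6' :: a else if e = '6' then '9' :: a else e :: a) acc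
      = (s.map pyFlip).reverse ++ acc := by
  induction s generalizing acc with
  | nil => simp
  | cons x xs ih => rw [List.foldl_cons, flipA_eq, ih]; simp

lemma altGo_iff (s : List Char) :
    ∀ (m i j : Nat), j + 1 - i ≤ m →
      (altGo s i j = true ↔
        ∀ k, i ≤ k → k ≤ j → pyFlip (s.getD k ' ') = s.getD (i + j - k) ' ') := by
  intro m
  induction m with
  | zero =>
    intro i j hm
    rw [altGo]
    have hij : ¬ i ≤ j := by omega
    simp only [hij, dif_neg, not_false_iff]
    constructor
    · intro _ k h1 h2; omega
    · intro _; trivial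
  | succ m ih =>
    intro i j hm
    rw [altGo]
    by_cases hij : i ≤ j
    · simp only [hij, dif_pos]
      by_cases heq : pyFlip (s.getD i ' ') = s.getD j ' '
      · have hrec := ih (i + 1) (j - 1) (by omega)
        simp only [heq, beq_self_eq_true, if_true, hrec]
        constructor
        · intro hmid k h1 h2
          by_cases hki : k = i
          · rw [hki]
            have hjj : i + j - i = j := by omega
            rw [hjj]; exact heq
          · by_cases hkj : k = j
            · rw [hkj]
              have hii : i + j - j = i := by omega
              rw [hii]
              have h3 := congrArg pyFlip heq
              rw [pyFlip_invol] at h3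
              rw [← h3]
            · have h1' : i + 1 ≤ k := by omega
              have h2' : k ≤ j - 1 := by omega
              have := hmid k h1' h2'
              have hs : (i + 1) + (j - 1) - k = i + j - k := by omega
              rwa [hs] at this
        · intro hall k h1 h2
          have h1' : i ≤ k := by omega
          have h2' : k ≤ j := by omega
          have := hall k h1' h2'
          have hs : (i + 1) + (j - 1) - k = i + j - k := by omega
          rw [hs]; exact this
      · have : (pyFlip (s.getD i ' ') == s.getD j ' ') = false := by
          simpa using heq
        simp only [this]
        constructor
        · intro hf; exact absurd hf (by simp)
        · intro hall
          have := hall i (le_refl i) hij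
          have hs : i + j - i = j := by omega
          rw [hs] at this
          exact absurd this heq
    · simp only [hij, dif_neg, not_false_iff]
      constructor
      · intro _ k h1 h2; omega
      · intro _; trivial

lemma rev_map_iff (s : List Char) :
    ((s.map pyFlip).reverse = s) ↔
      ∀ k, k < s.length → pyFlip (s.getD k ' ') = s.getD (s.length - 1 - k) ' ' := by
  constructor
  · intro h k hk
    have hk' : s.length - 1 - k < s.length := by omega
    have h1 : ((s.map pyFlip).reverse)[k]'(by simpa using hk) = s[k]'hk := by
      simp [h]
    rw [List.getElem_reverse, List.getElem_map] at h1
    have hlen : s.length - 1 - k < s.length := hk'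
    rw [List.getD_eq_getElem s ' ' hk, List.getD_eq_getElem s ' ' hk']
    -- h1 : pyFlip s[(s.map pyFlip).length - 1 - k] = s[k]
    have h2 := congrArg pyFlip h1
    rw [pyFlip_invol] at h2
    rw [← h2]
    congr 1
    simp
  · intro hall
    apply List.ext_getElem
    · simp
    · intro i h1 h2
      rw [List.getElem_reverse, List.getElem_map]
      have hlen : (s.map pyFlip).length = s.length := by simp
      have hi : i < s.length := h2
      have hidx : s.length - 1 - i < s.length := by omega
      have := hall (s.length - 1 - i) hidx
      rw [List.getD_eq_getElem s ' ' hidx] at this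
      have hii : s.length - 1 - (s.length - 1 - i) = i := by omega
      rw [hii, List.getD_eq_getElem s ' ' hi] at this
      simp only [List.length_map]
      convert this using 2

lemma core_eq (s : List Char) :
    (((s.map pyFlip).reverse ++ [] : List Char) == s) = altGo s 0 (s.length - 1) := by
  rw [List.append_nil]
  have hB := altGo_iff s (s.length - 1 + 1) 0 (s.length - 1) (by omega)
  by_cases hs : s = []
  · subst hs
    have h1 : altGo ([] : List Char) 1 0 = true := by rw [altGo]; simp
    have h0 : altGo ([] : List Char) 0 0 = true := by rw [altGo]; simp [pyFlip, h1]
    simpa using h0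
  · have hn : 1 ≤ s.length := by
      cases s with
      | nil => exact absurd rfl hs
      | cons a l => simp
    have hiff : ((s.map pyFlip).reverse = s) ↔ altGo s 0 (s.length - 1) = true := by
      rw [rev_map_iff, hB]
      constructor
      · intro h k h1 h2
        have hk : k < s.length := by omega
        have := h k hk
        have : pyFlip (s.getD k ' ') = s.getD (s.length - 1 - k) ' ' := this
        have hsum : 0 + (s.length - 1) - k = s.length - 1 - k := by omega
        rw [hsum]; exact this
      · intro h k hk
        have := h k (by omega) (by omega)
        have hsum : 0 + (s.length - 1) - k = s.length - 1 - k := by omega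
        rw [hsum] at this
        exact this
    cases hA : altGo s 0 (s.length - 1) with
    | true => simpa using hiff.2 hA
    | false =>
      have : ¬ ((s.map pyFlip).reverse = s) := fun h => by
        have := hiff.1 h; rw [hA] at this; exact absurd this (by simp)
      simpa using this

-- ===== VERDICT (by name: the statement is the Claim_ definition above) =====
theorem same_upsidedown_spec : Claim_equal_same_upsidedown := by
  intro ntxt _
  unfold Spec_same_upsidedown same_upsidedown same_upsidedown_alt
  simp only []
  rw [foldl_flip]
  exact core_eq _
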